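-- pv_equiv track=rewrite | github.com/aishu-0610/Python_Package | shopping_list.py | create_shopping_list
-- ===== SOURCE A (Python) =====
-- def create_shopping_list(meal_plan):
--     all_ingredients = []
--
--     for recipe in meal_plan:
--         recipe_name = recipe[0]
--         recipe_details = recipe[1]
--         ingredients = recipe_details.get("ingredients", [])
--         for item in ingredients:
--             all_ingredients.append(item)
--
--     unique_ingredients = []
--     for item in all_ingredients:
--         if item not in unique_ingredients:
--             unique_ingredients.append(item)
--
--     unique_ingredients.sort()
--     return unique_ingredients
-- ===== SOURCE B (Python) =====
-- def create_shopping_list(meal_plan):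
--     all_ingredients = []
--     for recipe in meal_plan:
--         all_ingredients.extend(recipe[1].get("ingredients", []))
--     all_ingredients.sort()
--     result = []
--     prev = None
--     for item in all_ingredients:
--         if item != prev:
--             result.append(item)
--             prev = item
--     return result
-- ===== Notes on version B (the rewrite author's own statement) =====
-- stated objective: alternative
-- what changed: A dedupes the flat ingredient list with a membership scan and then sorts the unique list; B sorts the flat list once and removes duplicates in a single adjacent-comparison pass over the sorted list.
import Mathlib
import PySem

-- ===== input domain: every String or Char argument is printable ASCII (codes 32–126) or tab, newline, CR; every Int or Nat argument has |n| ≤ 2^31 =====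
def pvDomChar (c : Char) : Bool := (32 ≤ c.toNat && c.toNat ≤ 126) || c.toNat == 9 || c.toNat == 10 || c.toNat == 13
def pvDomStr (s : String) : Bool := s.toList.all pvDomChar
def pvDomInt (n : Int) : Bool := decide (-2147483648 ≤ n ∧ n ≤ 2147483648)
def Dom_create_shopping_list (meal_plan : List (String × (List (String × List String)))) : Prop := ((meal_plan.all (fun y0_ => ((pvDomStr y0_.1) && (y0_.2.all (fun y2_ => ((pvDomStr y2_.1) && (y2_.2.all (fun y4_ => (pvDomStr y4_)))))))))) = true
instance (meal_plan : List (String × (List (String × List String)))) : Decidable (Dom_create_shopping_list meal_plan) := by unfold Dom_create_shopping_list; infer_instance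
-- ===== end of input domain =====

-- B replaces A's membership-scan dedup (followed by a sort) with sort-then-adjacent-dedup:
-- a structurally different decomposition of the same collect/dedupe/sort task.

-- ===== PORT A =====
def create_shopping_list (meal_plan : List (String × (List (String × List String)))) : List String :=
  let all_ingredients := meal_plan.foldl (fun acc recipe =>
    ((PySem.Dict.mk recipe.2).getD "ingredients" []).foldl (fun a item => a ++ [item]) acc) []
  let unique_ingredients := all_ingredients.foldl
    (fun u item => if item ∈ u then u else u ++ [item]) []
  PySem.List.sorted unique_ingredients (fun x => x) false

-- ===== PORT B =====
-- one step of Source B's dedup loop: state = (result, prev)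
def pvAdjStep (st : List String × Option String) (item : String) : List String × Option String :=
  if some item ≠ st.2 then (st.1 ++ [item], some item) else st

def create_shopping_list_alt (meal_plan : List (String × (List (String × List String)))) : List String :=
  let all_ingredients := meal_plan.foldl (fun acc recipe =>
    acc ++ (PySem.Dict.mk recipe.2).getD "ingredients" []) []
  let s := PySem.List.sorted all_ingredients (fun x => x) false
  (s.foldl pvAdjStep ([], none)).1

-- ===== PRECONDITION & SPEC =====
def Spec_create_shopping_list (meal_plan : List (String × (List (String × List String)))) (out : List String) : Prop := out = create_shopping_list_alt meal_plan
instance (meal_plan : List (String × (List (String × List String)))) (out : List String) : Decidable (Spec_create_shopping_list meal_plan out) := by unfold Spec_create_shopping_list; infer_instance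

-- ===== CLAIM (what is proved, stated in full; the proofs are below) =====
def Claim_equal_create_shopping_list : Prop := ∀ (meal_plan : List (String × (List (String × List String)))), Dom_create_shopping_list meal_plan → Spec_create_shopping_list meal_plan (create_shopping_list meal_plan)

-- ===== LEMMAS AND PROOFS =====

-- functional form of Source B's dedup loop
def pvAdj (prev : Option String) : List String → List String
  | [] => []
  | x :: t => if some x = prev then pvAdj prev t else x :: pvAdj (some x) t

theorem pvFoldl_adjStep (l : List String) (res : List String) (prev : Option String) :
    (l.foldl pvAdjStep (res, prev)).1 = res ++ pvAdj prev l := by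
  induction l generalizing res prev with
  | nil => simp [pvAdj]
  | cons x t ih =>
    simp only [List.foldl_cons, pvAdj, pvAdjStep]
    by_cases h : some x = prev
    · simp [h, ih]
    · simp [h, ih, List.append_assoc]

-- both flattening loops build the same list
theorem pvFlat_eq (mp : List (String × (List (String × List String)))) (init : List String) :
    mp.foldl (fun acc recipe =>
      ((PySem.Dict.mk recipe.2).getD "ingredients" []).foldl (fun a item => a ++ [item]) acc) init
      = mp.foldl (fun acc recipe => acc ++ (PySem.Dict.mk recipe.2).getD "ingredients" []) init := by
  simp only [PySem.List.foldl_append_singleton]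

-- A's membership dedup: nodup, and membership is acc-or-source
theorem pvDedup_spec (xs : List String) (acc : List String) (hacc : acc.Nodup) :
    (xs.foldl (fun u item => if item ∈ u then u else u ++ [item]) acc).Nodup ∧
    ∀ y, y ∈ xs.foldl (fun u item => if item ∈ u then u else u ++ [item]) acc ↔ y ∈ acc ∨ y ∈ xs := by
  induction xs generalizing acc with
  | nil => simpa using hacc
  | cons x t ih =>
    simp only [List.foldl_cons]
    by_cases h : x ∈ acc
    · simp only [if_pos h]
      obtain ⟨hn, hm⟩ := ih acc hacc
      refine ⟨hn, fun y => ?_⟩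
      rw [hm y]
      constructor
      · rintro (hy | hy)
        · exact Or.inl hy
        · exact Or.inr (List.mem_cons_of_mem _ hy)
      · rintro (hy | hy)
        · exact Or.inl hy
        · rcases List.mem_cons.1 hy with rfl | hy
          · exact Or.inl h
          · exact Or.inr hy
    · simp only [if_neg h]
      obtain ⟨hn, hm⟩ := ih (acc ++ [x]) (by simp [List.nodup_append, hacc]; exact fun a ha he => h (he ▸ ha))
      refine ⟨hn, fun y => ?_⟩
      rw [hm y]
      simp only [List.mem_append, List.mem_cons]
      tauto

-- B's adjacent dedup on a sorted list: strictly increasing, membership = source minus prev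
theorem pvAdj_spec (l : List String) (hl : l.Pairwise (· ≤ ·)) (p : Option String)
    (hp : ∀ y ∈ l, ∀ q, p = some q → q ≤ y) :
    (pvAdj p l).Pairwise (· < ·) ∧
    ∀ y, y ∈ pvAdj p l ↔ y ∈ l ∧ ∀ q, p = some q → q < y := by
  induction l generalizing p with
  | nil => simp [pvAdj]
  | cons x t ih =>
    rcases List.pairwise_cons.1 hl with ⟨hx, ht⟩
    obtain ⟨hpw, hm⟩ := ih ht (some x) (fun y hy q hq => by cases hq; exact hx y hy)
    by_cases h : some x = p
    · subst h
      have e : pvAdj (some x) (x :: t) = pvAdj (some x) t := by simp [pvAdj]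
      rw [e]
      refine ⟨hpw, fun y => ?_⟩
      rw [hm y]
      constructor
      · rintro ⟨hy, hq⟩
        exact ⟨List.mem_cons_of_mem _ hy, hq⟩
      · rintro ⟨hy, hq⟩
        rcases List.mem_cons.1 hy with rfl | hy
        · exact absurd (hq y rfl) (lt_irrefl y)
        · exact ⟨hy, hq⟩
    · have e : pvAdj p (x :: t) = x :: pvAdj (some x) t := by simp [pvAdj, h]
      rw [e]
      have hpx : ∀ q, p = some q → q < x := by
        intro q hq
        have hle := hp x List.mem_cons_self q hq
        exact lt_of_le_of_ne hle (fun he => h (by rw [hq, he]))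
      constructor
      · refine List.pairwise_cons.2 ⟨fun y hy => ?_, hpw⟩
        exact ((hm y).1 hy).2 x rfl
      · intro y
        simp only [List.mem_cons, hm]
        constructor
        · rintro (rfl | ⟨hy, hq⟩)
          · exact ⟨Or.inl rfl, hpx⟩
          · exact ⟨Or.inr hy, fun q hq' => lt_trans (hpx q hq') (hq x rfl)⟩
        · rintro ⟨hy | hy, hq⟩
          · exact Or.inl hy
          · by_cases hxy : y = x
            · exact Or.inl hxy
            · exact Or.inr ⟨hy, fun q hq' => by
                cases hq'; exact lt_of_le_of_ne (hx y hy) (fun he => hxy he.symm)⟩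

-- ===== VERDICT (by name: the statement is the Claim_ definition above) =====
theorem create_shopping_list_spec : Claim_equal_create_shopping_list := by
  intro mp _
  unfold Spec_create_shopping_list create_shopping_list create_shopping_list_alt
  simp only [pvFlat_eq, pvFoldl_adjStep, List.nil_append]
  set xs := mp.foldl (fun acc recipe => acc ++ (PySem.Dict.mk recipe.2).getD "ingredients" []) [] with hxs
  set u := xs.foldl (fun u item => if item ∈ u then u else u ++ [item]) [] with hu
  set s := PySem.List.sorted xs (fun x => x) false with hs
  obtain ⟨hun, hum⟩ := pvDedup_spec xs [] List.nodup_nil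
  have hsp : s.Pairwise (· ≤ ·) := PySem.List.sorted_pairwise xs (fun x => x)
  obtain ⟨hapw, ham⟩ := pvAdj_spec s hsp none (by simp)
  have hperm : (pvAdj none s).Perm u := by
    rw [List.perm_ext_iff_of_nodup (hapw.imp (fun h => ne_of_lt h)) hun]
    intro y
    rw [ham y, hum y]
    simp [hs, PySem.List.mem_sorted]
  exact PySem.List.sorted_eq_of_perm_of_pairwise_lt u (pvAdj none s) (fun x => x) hperm hapw
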